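-- pv_equiv track=rewrite | github.com/ETJeanMachine/advent-of-code | 2015/solutions/day-8.py | part_two
-- ===== SOURCE A (Python) =====
-- def part_two(input: str) -> int:
--     original_count, encoded_count = 0, 0
--     for string in input.split():
--         original_count += len(string)
--         encode_str = string.replace("\\", "\\\\").replace('"', '\\"')
--         encode_str = f'"{encode_str}"'
--         encoded_count += len(encode_str)
--     return encoded_count - original_count
-- ===== SOURCE B (Python) =====
-- def part_two(input: str) -> int:
--     return sum(2 + s.count('\\') + s.count('"') for s in input.split())
-- ===== Notes on version B (the rewrite author's own statement) =====
-- stated objective: simpler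
-- what changed: Instead of building each escaped string and subtracting total lengths, B sums each token's overhead arithmetically as 2 + count of backslashes + count of double quotes, constructing no strings.
import Mathlib
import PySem

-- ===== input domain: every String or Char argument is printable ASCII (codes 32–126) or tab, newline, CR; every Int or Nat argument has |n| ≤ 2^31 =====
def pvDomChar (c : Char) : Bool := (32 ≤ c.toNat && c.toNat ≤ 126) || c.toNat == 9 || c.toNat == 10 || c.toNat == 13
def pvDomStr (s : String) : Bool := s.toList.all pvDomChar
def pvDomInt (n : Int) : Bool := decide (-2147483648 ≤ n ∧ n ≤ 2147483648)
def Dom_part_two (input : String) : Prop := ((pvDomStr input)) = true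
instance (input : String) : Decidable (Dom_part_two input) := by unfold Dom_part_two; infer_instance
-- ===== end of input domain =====

-- B replaces A's string building with arithmetic per token (2 + counts); equivalence proved on all inputs.

-- ===== PORT A =====
def part_two (input : String) : Int :=
  let r := (PySem.Str.split₀ input).foldl
    (fun (st : Int × Int) string =>
      let original_count := st.1 + (PySem.Str.len string : Int)
      let encode_str := PySem.Str.replace (PySem.Str.replace string "\\" "\\\\") "\"" "\\\""
      let encode_str := "\"" ++ encode_str ++ "\""
      (original_count, st.2 + (PySem.Str.len encode_str : Int)))
    (0, 0)
  r.2 - r.1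

-- ===== PORT B =====
def part_two_alt (input : String) : Int :=
  ((PySem.Str.split₀ input).map
    (fun s => (2 : Int) + (PySem.Str.count s "\\" : Int) + (PySem.Str.count s "\"" : Int))).sum

-- ===== PRECONDITION & SPEC =====
def Spec_part_two (input : String) (out : Int) : Prop := out = part_two_alt input
instance (input : String) (out : Int) : Decidable (Spec_part_two input out) := by unfold Spec_part_two; infer_instance

-- ===== CLAIM (what is proved, stated in full; the proofs are below) =====
def Claim_equal_part_two : Prop := ∀ (input : String), Dom_part_two input → Spec_part_two input (part_two input)

-- ===== LEMMAS AND PROOFS =====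

theorem replace_go_len (c : Char) (nw : List Char) (hnw : nw.length = 2) :
    ∀ (fuel : Nat) (l acc : List Char), l.length ≤ fuel →
      (PySem.Chars.replace.go [c] nw fuel l acc).length = acc.length + l.length + l.count c := by
  intro fuel
  induction fuel with
  | zero =>
    intro l acc h
    have : l = [] := List.eq_nil_of_length_eq_zero (Nat.le_zero.mp h)
    subst this; simp [PySem.Chars.replace.go]
  | succ n ih =>
    intro l acc h
    cases l with
    | nil => simp [PySem.Chars.replace.go]
    | cons x t =>
      simp only [PySem.Chars.replace.go, List.isPrefixOf, Bool.and_true]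
      by_cases hx : c = x
      · subst hx
        simp only [beq_self_eq_true, if_pos, List.length_cons, List.length_nil,
          Nat.zero_add, List.drop_succ_cons, List.drop_zero]
        rw [ih t (nw.reverse ++ acc) (by simpa using Nat.le_of_succ_le_succ h)]
        simp [hnw]; omega
      · rw [if_neg (by simp [hx])]
        rw [ih t (x :: acc) (by simpa using Nat.le_of_succ_le_succ h)]
        simp [Ne.symm hx]
        omega

theorem replace_go_count (c c' : Char) (nw : List Char) (hne : c' ≠ c) (hnw : c' ∉ nw) :
    ∀ (fuel : Nat) (l acc : List Char), l.length ≤ fuel →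
      (PySem.Chars.replace.go [c] nw fuel l acc).count c' = acc.count c' + l.count c' := by
  intro fuel
  induction fuel with
  | zero =>
    intro l acc h
    have : l = [] := List.eq_nil_of_length_eq_zero (Nat.le_zero.mp h)
    subst this; simp [PySem.Chars.replace.go]
  | succ n ih =>
    intro l acc h
    cases l with
    | nil => simp [PySem.Chars.replace.go]
    | cons x t =>
      simp only [PySem.Chars.replace.go, List.isPrefixOf, Bool.and_true]
      by_cases hx : c = x
      · subst hx
        simp only [beq_self_eq_true, if_pos, List.length_cons, List.length_nil,
          Nat.zero_add, List.drop_succ_cons, List.drop_zero]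
        rw [ih t (nw.reverse ++ acc) (by simpa using Nat.le_of_succ_le_succ h)]
        have h0 : (nw.reverse).count c' = 0 := by
          simp [List.count_eq_zero]; simpa using hnw
        simp [List.count_append, h0, Ne.symm hne]
      · rw [if_neg (by simp [hx])]
        rw [ih t (x :: acc) (by simpa using Nat.le_of_succ_le_succ h)]
        simp [List.count_cons]
        omega

theorem count_go_single (c : Char) :
    ∀ (fuel : Nat) (l : List Char) (acc : Nat), l.length ≤ fuel →
      PySem.Chars.count.go [c] fuel l acc = acc + l.count c := by
  intro fuel
  induction fuel with
  | zero =>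
    intro l acc h
    have : l = [] := List.eq_nil_of_length_eq_zero (Nat.le_zero.mp h)
    subst this; simp [PySem.Chars.count.go]
  | succ n ih =>
    intro l acc h
    cases l with
    | nil => simp [PySem.Chars.count.go]
    | cons x t =>
      simp only [PySem.Chars.count.go, List.isPrefixOf, Bool.and_true]
      by_cases hx : c = x
      · subst hx
        simp only [beq_self_eq_true, if_pos, List.length_cons, List.length_nil,
          Nat.zero_add, List.drop_succ_cons, List.drop_zero]
        rw [ih t (acc + 1) (by simpa using Nat.le_of_succ_le_succ h)]
        simp; omega
      · rw [if_neg (by simp [hx])]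
        rw [ih t acc (by simpa using Nat.le_of_succ_le_succ h)]
        simp [Ne.symm hx]

theorem chars_replace_len (c : Char) (nw : List Char) (hnw : nw.length = 2) (s : List Char) :
    (PySem.Chars.replace s [c] nw).length = s.length + s.count c := by
  simp [PySem.Chars.replace, replace_go_len c nw hnw s.length s [] le_rfl]

theorem chars_replace_count (c c' : Char) (nw : List Char) (hne : c' ≠ c) (hnw : c' ∉ nw) (s : List Char) :
    (PySem.Chars.replace s [c] nw).count c' = s.count c' := by
  simp [PySem.Chars.replace, replace_go_count c c' nw hne hnw s.length s [] le_rfl]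

theorem chars_count_single (c : Char) (s : List Char) :
    PySem.Chars.count s [c] = s.count c := by
  simp [PySem.Chars.count, count_go_single c s.length s 0 le_rfl]

-- per-token: encoded length = original length + 2 + backslashes + quotes
theorem token_len (s : String) :
    (PySem.Str.len ("\"" ++ PySem.Str.replace (PySem.Str.replace s "\\" "\\\\") "\"" "\\\"" ++ "\"") : Int)
      = (PySem.Str.len s : Int) + 2 + (PySem.Str.count s "\\" : Int) + (PySem.Str.count s "\"" : Int) := by
  have hlen : ∀ t : String, PySem.Str.len t = t.toList.length := by
    intro t; simp [PySem.Str.len]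
  have hq : ("\"" ++ PySem.Str.replace (PySem.Str.replace s "\\" "\\\\") "\"" "\\\"" ++ "\"").toList
      = '"' :: (PySem.Str.replace (PySem.Str.replace s "\\" "\\\\") "\"" "\\\"").toList ++ ['"'] := by
    simp
  have h1 : (PySem.Str.replace s "\\" "\\\\").toList
      = PySem.Chars.replace s.toList ['\\'] ['\\', '\\'] := by
    simp [PySem.Str.replace]
  have h2 : (PySem.Str.replace (PySem.Str.replace s "\\" "\\\\") "\"" "\\\"").toList
      = PySem.Chars.replace (PySem.Chars.replace s.toList ['\\'] ['\\', '\\']) ['"'] ['\\', '"'] := by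
    simp [PySem.Str.replace]
  rw [hlen, hlen, hq]
  simp only [List.length_cons, List.length_append, List.length_cons, List.length_nil, h2]
  rw [chars_replace_len '"' ['\\', '"'] rfl,
      chars_replace_len '\\' ['\\', '\\'] rfl,
      chars_replace_count '\\' '"' ['\\', '\\'] (by decide) (by decide)]
  have hc1 : (PySem.Str.count s "\\" : Nat) = s.toList.count '\\' := by
    simpa using chars_count_single '\\' s.toList
  have hc2 : (PySem.Str.count s "\"" : Nat) = s.toList.count '"' := by
    simpa using chars_count_single '"' s.toList
  rw [hc1, hc2]
  push_cast
  omega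

theorem fold_diff (ts : List String) : ∀ (a b : Int),
    ((ts.foldl
      (fun (st : Int × Int) string =>
        let original_count := st.1 + (PySem.Str.len string : Int)
        let encode_str := PySem.Str.replace (PySem.Str.replace string "\\" "\\\\") "\"" "\\\""
        let encode_str := "\"" ++ encode_str ++ "\""
        (original_count, st.2 + (PySem.Str.len encode_str : Int)))
      (a, b)).2 -
     (ts.foldl
      (fun (st : Int × Int) string =>
        let original_count := st.1 + (PySem.Str.len string : Int)
        let encode_str := PySem.Str.replace (PySem.Str.replace string "\\" "\\\\") "\"" "\\\""
        let encode_str := "\"" ++ encode_str ++ "\""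
        (original_count, st.2 + (PySem.Str.len encode_str : Int)))
      (a, b)).1)
    = b - a + (ts.map (fun s => (2 : Int) + (PySem.Str.count s "\\" : Int) + (PySem.Str.count s "\"" : Int))).sum := by
  induction ts with
  | nil => intro a b; simp
  | cons s t ih =>
    intro a b
    simp only [List.foldl_cons, List.map_cons, List.sum_cons]
    rw [ih]
    have := token_len s
    omega

-- ===== VERDICT (by name: the statement is the Claim_ definition above) =====
theorem part_two_spec : Claim_equal_part_two := by
  intro input _
  unfold Spec_part_two part_two part_two_alt
  simpa using fold_diff (PySem.Str.split₀ input) 0 0
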